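-- pv_equiv track=rewrite | github.com/jackneil/wepublic_defender | wepublic_defender/research_log.py | _upsert_section
-- ===== SOURCE A (Python) =====
-- def _upsert_section(md: str, header: str, body: str) -> str:
--     """
--     Insert or replace a section beginning with `header` (a line) in md text.
--
--     Args:
--         md: Existing markdown content
--         header: Section header to find/replace (e.g., "## Smith v. Jones")
--         body: New content for the section
--
--     Returns:
--         Updated markdown with section upserted
--
--     Examples:
--         >>> # Test appending new section
--         >>> md = "# Log\\n\\n## Case 1\\nContent 1"
--         >>> result = _upsert_section(md, "## Case 2", "## Case 2\\nContent 2")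
--         >>> "Case 2" in result
--         True
--         >>> "Content 2" in result
--         True
--
--         >>> # Test replacing existing section
--         >>> md = "# Log\\n\\n## Case 1\\nOld content\\n\\n## Case 2\\nContent 2"
--         >>> result = _upsert_section(md, "## Case 1", "## Case 1\\nNew content")
--         >>> "New content" in result
--         True
--         >>> "Old content" not in result
--         True
--     """
--     lines = md.splitlines()
--     start = None
--     for i, ln in enumerate(lines):
--         if ln.strip() == header.strip():
--             start = i
--             break
--     if start is None:
--         # append with spacer
--         return (md + ("\n\n" if md.strip() else "")) + body.strip() + "\n"
--     # find end: next line that starts with '## '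
--     end = len(lines)
--     for j in range(start + 1, len(lines)):
--         if lines[j].startswith("## "):
--             end = j
--             break
--     new_lines = lines[:start] + body.strip().splitlines() + lines[end:]
--     return "\n".join(new_lines) + ("\n" if not new_lines[-1].endswith("\n") else "")
-- ===== SOURCE B (Python) =====
-- def _upsert_section(md: str, header: str, body: str) -> str:
--     """Single-pass state machine: copy lines, splice the new body at the header, skip the old section."""
--     h = header.strip()
--     new_body = body.strip()
--     out = []
--     state = 0  # 0 = copying (header not seen), 1 = skipping old section, 2 = copying the rest
--     for ln in md.splitlines():
--         if state == 0:
--             if ln.strip() == h: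
--                 out.extend(new_body.splitlines())
--                 state = 1
--             else:
--                 out.append(ln)
--         elif state == 1:
--             if ln.startswith("## "):
--                 out.append(ln)
--                 state = 2
--         else:
--             out.append(ln)
--     if state == 0:
--         # header never seen: append with spacer
--         return md + ("\n\n" if md.strip() else "") + new_body + "\n"
--     return "\n".join(out) + "\n"
-- ===== Notes on version B (the rewrite author's own statement) =====
-- stated objective: alternative
-- what changed: Replaces A's two index-based scans (find header index, find end index) plus slice-splice by a single-pass state machine over the lines that copies, splices the new body at the header, skips the old section, then resumes copying.
-- outside the precondition, e.g. on _upsert_section('## H', '## H', ''): A raises IndexError, B returns '\n'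
-- crash fix: When body strips to empty, the first line of md matches the header and no later line starts with '## ', A raises IndexError on new_lines[-1]; B returns '\n'. — e.g. on _upsert_section("## H", "## H", ""): A raises IndexError, B returns "\n"
import Mathlib
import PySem

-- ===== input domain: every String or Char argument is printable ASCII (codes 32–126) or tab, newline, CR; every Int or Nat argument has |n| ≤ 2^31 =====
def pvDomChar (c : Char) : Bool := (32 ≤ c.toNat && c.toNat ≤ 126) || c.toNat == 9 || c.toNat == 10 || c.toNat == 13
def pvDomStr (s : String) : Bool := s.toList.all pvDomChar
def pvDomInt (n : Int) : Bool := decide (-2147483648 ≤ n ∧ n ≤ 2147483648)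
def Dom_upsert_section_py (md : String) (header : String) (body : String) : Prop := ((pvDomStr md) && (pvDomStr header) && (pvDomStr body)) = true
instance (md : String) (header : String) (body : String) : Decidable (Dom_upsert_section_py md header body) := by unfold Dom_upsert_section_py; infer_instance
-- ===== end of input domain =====

-- B replaces A's two sequential index-based scans + slice splice by a single-pass
-- state machine over the lines (objective: alternative decomposition, same cost).
-- Pre_ excludes only the inputs where Python A raises IndexError (new_lines empty).

-- ===== PORT A =====

-- A's first loop: index of the first line whose strip equals h (enumerate + break)
def aFindStart (h : String) : List String → Option Nat
  | [] => none
  | x :: xs =>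
    if PySem.Str.strip x = h then some 0
    else (aFindStart h xs).map (· + 1)

-- A's second loop over range(start+1, len): offset of first line starting with "## "
def aFirstHH : List String → Option Nat
  | [] => none
  | x :: xs =>
    if PySem.Str.startswith x "## " then some 0
    else (aFirstHH xs).map (· + 1)

def upsert_section_py (md : String) (header : String) (body : String) : String :=
  let lines := PySem.Str.splitlines md
  match aFindStart (PySem.Str.strip header) lines with
  | none =>
    md ++ (if PySem.Str.strip md ≠ "" then "\n\n" else "") ++ PySem.Str.strip body ++ "\n"
  | some start =>
    let endIdx : Nat :=
      match aFirstHH (lines.drop (start + 1)) with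
      | none => lines.length
      | some k => start + 1 + k
    let new_lines := lines.take start ++ PySem.Str.splitlines (PySem.Str.strip body) ++ lines.drop endIdx
    let res := PySem.Str.join "\n" new_lines
    -- new_lines[-1]: Python raises IndexError when new_lines = []; Pre_ excludes that
    match PySem.List.pyGet? new_lines (-1) with
    | none => res
    | some last => res ++ (if PySem.Str.endswith last "\n" then "" else "\n")

-- ===== PORT B =====

-- one step of B's state machine: state 0 = copying before the header,
-- 1 = skipping the old section, 2 = copying the rest
def bStep (h : String) (bl : List String) (st : List String × Nat) (ln : String) : List String × Nat :=
  match st with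
  | (out, 0) => if PySem.Str.strip ln = h then (out ++ bl, 1) else (out ++ [ln], 0)
  | (out, 1) => if PySem.Str.startswith ln "## " then (out ++ [ln], 2) else (out, 1)
  | (out, _) => (out ++ [ln], 2)

def upsert_section_py_alt (md : String) (header : String) (body : String) : String :=
  let h := PySem.Str.strip header
  let new_body := PySem.Str.strip body
  let r := (PySem.Str.splitlines md).foldl (bStep h (PySem.Str.splitlines new_body)) ([], 0)
  if r.2 = 0 then
    md ++ (if PySem.Str.strip md ≠ "" then "\n\n" else "") ++ new_body ++ "\n"
  else
    PySem.Str.join "\n" r.1 ++ "\n"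

-- ===== PRECONDITION & SPEC =====

-- crashB: exactly the inputs on which Python A raises IndexError (new_lines = []):
-- body strips to empty, the FIRST line of md matches the header, and no later line
-- starts with "## ".
def crashB (md : String) (header : String) (body : String) : Bool :=
  (PySem.Str.strip body == "") &&
  (match PySem.Str.splitlines md with
   | [] => false
   | x :: xs =>
     (PySem.Str.strip x == PySem.Str.strip header) &&
     xs.all (fun y => ! PySem.Str.startswith y "## "))

-- Pre_ excludes only the inputs where A raises IndexError (empty new_lines); A returns on all others.
def Pre_upsert_section_py (md : String) (header : String) (body : String) : Prop :=
  crashB md header body = false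
instance (md : String) (header : String) (body : String) : Decidable (Pre_upsert_section_py md header body) := by
  unfold Pre_upsert_section_py; infer_instance

def pvWitness_upsert_section_py : String × String × String := ("# Log\n\n## A\nx", "## B", "## B\ny")

-- On inputs where the header matches the very first line, the body strips to empty and no
-- later line starts with "## ", A raises IndexError on new_lines[-1]; B returns "\n".
def Raises_upsert_section_py (md : String) (header : String) (body : String) : Prop :=
  crashB md header body = true
instance (md : String) (header : String) (body : String) : Decidable (Raises_upsert_section_py md header body) := by
  unfold Raises_upsert_section_py; infer_instance

def pvRaiseWitness_upsert_section_py : String × String × String := ("## H", "## H", "")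
def pvRaiseWitnessOut_upsert_section_py : String := "\n"

def Spec_upsert_section_py (md : String) (header : String) (body : String) (out : String) : Prop := out = upsert_section_py_alt md header body
instance (md : String) (header : String) (body : String) (out : String) : Decidable (Spec_upsert_section_py md header body out) := by unfold Spec_upsert_section_py; infer_instance

-- ===== CLAIM (what is proved, stated in full; the proofs are below) =====
def Claim_equal_upsert_section_py : Prop := ∀ (md : String) (header : String) (body : String), Dom_upsert_section_py md header body → Pre_upsert_section_py md header body → Spec_upsert_section_py md header body (upsert_section_py md header body)

def Claim_raises_upsert_section_py : Prop := (∀ (md : String) (header : String) (body : String), Dom_upsert_section_py md header body → Raises_upsert_section_py md header body → ¬ Pre_upsert_section_py md header body) ∧ (Dom_upsert_section_py (pvRaiseWitness_upsert_section_py.1) (pvRaiseWitness_upsert_section_py.2.1) (pvRaiseWitness_upsert_section_py.2.2) ∧ Raises_upsert_section_py (pvRaiseWitness_upsert_section_py.1) (pvRaiseWitness_upsert_section_py.2.1) (pvRaiseWitness_upsert_section_py.2.2) ∧ upsert_section_py_alt (pvRaiseWitness_upsert_section_py.1) (pvRaiseWitness_upsert_section_py.2.1) (pvRaiseWitness_upsert_section_py.2.2)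 = pvRaiseWitnessOut_upsert_section_py)

-- ===== LEMMAS AND PROOFS =====

-- the suffix of xs from the first "## " line on (what B's skip state keeps)
def dropU : List String → List String
  | [] => []
  | x :: xs => if PySem.Str.startswith x "## " then x :: xs else dropU xs

theorem go_clean (isB : Char → Bool) (s cur : List Char) (acc : List (List Char))
    (hcur : ∀ c ∈ cur, isB c = false) (hacc : ∀ l ∈ acc, ∀ c ∈ l, isB c = false) :
    ∀ l ∈ PySem.Chars.splitlines.go isB s cur acc, ∀ c ∈ l, isB c = false := by
  induction s, cur, acc using PySem.Chars.splitlines.go.induct isB with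
  | case1 cur acc hc =>
    rw [PySem.Chars.splitlines.go]; simp [hc]
    intro l hl; exact hacc l hl
  | case2 cur acc hc =>
    rw [PySem.Chars.splitlines.go]; simp [hc]
    intro l hl
    rcases hl with h2 | h1
    · exact hacc l h2
    · subst h1; intro c hcm; exact hcur c (List.mem_reverse.mp hcm)
  | case3 rest cur acc ih =>
    rw [PySem.Chars.splitlines.go]
    apply ih
    · intro c hc; cases hc
    · intro l hl; rcases List.mem_cons.mp hl with h1 | h2
      · subst h1; intro c hcm; exact hcur c (List.mem_reverse.mp hcm)
      · exact hacc l h2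
  | case4 c rest cur acc hne hb ih =>
    rw [PySem.Chars.splitlines.go]
    · simp only [hb, if_pos]
      apply ih
      · intro c hc; cases hc
      · intro l hl; rcases List.mem_cons.mp hl with h1 | h2
        · subst h1; intro c hcm; exact hcur c (List.mem_reverse.mp hcm)
        · exact hacc l h2
    · exact hne
  | case5 c rest cur acc hne hb ih =>
    rw [PySem.Chars.splitlines.go]
    · simp only [hb, if_neg, Bool.not_eq_true]
      apply ih
      · intro c' hc'; rcases List.mem_cons.mp hc' with h1 | h2
        · subst h1; simpa using hb
        · exact hcur c' h2
      · exact hacc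
    · exact hne

theorem go_ne_nil (isB : Char → Bool) (s cur : List Char) (acc : List (List Char))
    (h : s ≠ [] ∨ cur ≠ [] ∨ acc ≠ []) :
    PySem.Chars.splitlines.go isB s cur acc ≠ [] := by
  induction s, cur, acc using PySem.Chars.splitlines.go.induct isB with
  | case1 cur acc hc =>
    rw [PySem.Chars.splitlines.go]; simp [hc]
    rcases h with h | h | h
    · exact absurd rfl h
    · exact absurd (List.isEmpty_iff.mp hc) h
    · simpa using h
  | case2 cur acc hc =>
    rw [PySem.Chars.splitlines.go]; simp [hc]
  | case3 rest cur acc ih =>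
    rw [PySem.Chars.splitlines.go]; exact ih (Or.inr (Or.inr (by simp)))
  | case4 c rest cur acc hne hb ih =>
    rw [PySem.Chars.splitlines.go]
    · simp only [hb, if_pos]; exact ih (Or.inr (Or.inr (by simp)))
    · exact hne
  | case5 c rest cur acc hne hb ih =>
    rw [PySem.Chars.splitlines.go]
    · simp only [hb, if_neg, Bool.not_eq_true]; exact ih (Or.inr (Or.inl (by simp)))
    · exact hne

theorem splitlines_ne_nil (s : String) (h : s ≠ "") : PySem.Str.splitlines s ≠ [] := by
  unfold PySem.Str.splitlines PySem.Chars.splitlines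
  simp only [ne_eq, List.map_eq_nil_iff]
  apply go_ne_nil
  left
  intro hl
  apply h
  have : s.toList = ("" : String).toList := by simpa using hl
  exact String.toList_inj.mp this

theorem splitlines_no_nl_end (s l : String) (hl : l ∈ PySem.Str.splitlines s) :
    PySem.Str.endswith l "\n" = false := by
  have hmem : l.toList ∈ PySem.Chars.splitlines s.toList := by
    rw [← PySem.Str.splitlines_map_toList]
    exact List.mem_map_of_mem hl
  have hclean : ∀ c ∈ l.toList, ('\n' : Char) ≠ c := by
    intro c hc he
    unfold PySem.Chars.splitlines at hmem
    have := go_clean _ _ _ _ (by intro c h; cases h) (by intro a h; cases h) l.toList hmem c hc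
    subst he
    simp at this
  rw [PySem.Str.endswith_eq]
  by_contra hb
  have : ("\n" : String).toList <:+ l.toList :=
    (PySem.Chars.endswith_iff _ _).mp (by simpa using hb)
  have hn : ('\n' : Char) ∈ l.toList := by
    rcases this with ⟨t, ht⟩
    rw [← ht]; simp
  exact hclean _ hn rfl

theorem bfold2 (h : String) (bl : List String) (ls : List String) : ∀ out,
    ls.foldl (bStep h bl) (out, 2) = (out ++ ls, 2) := by
  induction ls with
  | nil => simp
  | cons x xs ih => intro out; simp only [List.foldl_cons, bStep, ih]; simp

theorem bfold1 (h : String) (bl : List String) (ls : List String) : ∀ out,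
    ∃ st', st' ≠ 0 ∧ ls.foldl (bStep h bl) (out, 1) = (out ++ dropU ls, st') := by
  induction ls with
  | nil => intro out; exact ⟨1, by simp, by simp [dropU]⟩
  | cons x xs ih =>
    intro out
    by_cases hx : PySem.Str.startswith x "## " = true
    · refine ⟨2, by simp, ?_⟩
      simp only [List.foldl_cons, bStep, hx, if_pos, dropU, bfold2]
      simp [hx]
    · rcases ih out with ⟨st', hne, heq⟩
      refine ⟨st', hne, ?_⟩
      simp only [List.foldl_cons, bStep, hx, if_neg, dropU, heq]
      simp [hx, heq]

theorem bfold0_none (h : String) (bl : List String) (ls : List String)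
    (hf : aFindStart h ls = none) : ∀ out,
    ls.foldl (bStep h bl) (out, 0) = (out ++ ls, 0) := by
  induction ls with
  | nil => simp
  | cons x xs ih =>
    intro out
    by_cases hx : PySem.Str.strip x = h
    · simp [aFindStart, hx] at hf
    · have hf' : aFindStart h xs = none := by
        simp [aFindStart, hx] at hf; simpa using hf
      simp only [List.foldl_cons, bStep, hx, if_neg, ih hf']
      simp [hx, ih hf']

theorem bfold0_some (h : String) (bl : List String) (ls : List String) (s : Nat)
    (hf : aFindStart h ls = some s) : ∀ out,
    ∃ st', st' ≠ 0 ∧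
      ls.foldl (bStep h bl) (out, 0) = (out ++ ls.take s ++ bl ++ dropU (ls.drop (s + 1)), st') := by
  induction ls generalizing s with
  | nil => simp [aFindStart] at hf
  | cons x xs ih =>
    intro out
    by_cases hx : PySem.Str.strip x = h
    · have hs : s = 0 := by simp [aFindStart, hx] at hf; omega
      subst hs
      rcases bfold1 h bl xs (out ++ bl) with ⟨st', hne, heq⟩
      refine ⟨st', hne, ?_⟩
      simp only [List.foldl_cons, bStep, hx, if_pos, heq]
      simp [hx, heq]
    · have : ∃ s', aFindStart h xs = some s' ∧ s = s' + 1 := by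
        simp [aFindStart, hx] at hf
        rcases hf with ⟨s', h1, h2⟩; exact ⟨s', h1, h2.symm⟩
      rcases this with ⟨s', hf', rfl⟩
      rcases ih s' hf' (out ++ [x]) with ⟨st', hne, heq⟩
      refine ⟨st', hne, ?_⟩
      simp only [List.foldl_cons, bStep, hx, if_neg]
      rw [show (s' + 1 + 1) = s' + 2 from rfl]
      simp [hx, heq, List.take_succ_cons, List.drop_succ_cons]

theorem firstHH_dropU (t : List String) :
    (match aFirstHH t with
     | none => ([] : List String)
     | some k => t.drop k) = dropU t := by
  induction t with
  | nil => simp [aFirstHH, dropU]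
  | cons x xs ih =>
    by_cases hx : PySem.Str.startswith x "## " = true
    · unfold aFirstHH dropU; rw [if_pos hx, if_pos hx]; simp
    · simp only [aFirstHH, hx, if_neg, dropU, Bool.false_eq_true]
      cases hfh : aFirstHH xs with
      | none => simp [hfh] at ih ⊢; simpa [hx] using ih
      | some k => simp [hfh] at ih ⊢; simpa [hx] using ih

theorem findStart_lt (h : String) (ls : List String) : ∀ s, aFindStart h ls = some s →
    s < ls.length := by
  induction ls with
  | nil => intro s hf; simp [aFindStart] at hf
  | cons x xs ih =>
    intro s hf
    by_cases hx : PySem.Str.strip x = h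
    · simp [aFindStart, hx] at hf; simp; omega
    · simp [aFindStart, hx] at hf
      rcases hf with ⟨s', h1, h2⟩
      have := ih s' h1
      simp; omega

theorem findStart_zero (h : String) (ls : List String) (hf : aFindStart h ls = some 0) :
    ∃ x xs, ls = x :: xs ∧ PySem.Str.strip x = h := by
  cases ls with
  | nil => simp [aFindStart] at hf
  | cons x xs =>
    by_cases hx : PySem.Str.strip x = h
    · exact ⟨x, xs, rfl, hx⟩
    · simp [aFindStart, hx] at hf

theorem dropU_subset (t : List String) : dropU t ⊆ t := by
  induction t with
  | nil => simp [dropU]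
  | cons x xs ih =>
    by_cases hx : PySem.Str.startswith x "## " = true
    · unfold dropU; rw [if_pos hx]; exact List.Subset.refl _
    · simp only [dropU, hx, Bool.false_eq_true, if_neg]
      exact List.Subset.trans (by simpa [hx] using ih) (List.subset_cons_self x xs)

theorem dropU_ne_nil (t : List String) (y : String) (hy : y ∈ t)
    (hs : PySem.Str.startswith y "## " = true) : dropU t ≠ [] := by
  induction t with
  | nil => cases hy
  | cons x xs ih =>
    by_cases hx : PySem.Str.startswith x "## " = true
    · unfold dropU; rw [if_pos hx]; simp
    · simp only [dropU, hx, Bool.false_eq_true, if_neg]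
      rcases List.mem_cons.mp hy with rfl | hy'
      · exact absurd hs hx
      · simpa [hx] using ih hy'

theorem pyGet_neg_one {α : Type} (xs : List α) : PySem.List.pyGet? xs (-1) = xs.getLast? := by
  cases xs with
  | nil => simp [PySem.List.pyGet?, PySem.List.pyIdx?]
  | cons x xs =>
    simp [PySem.List.pyGet?, PySem.List.pyIdx?]
    rw [List.getLast?_eq_getElem?]
    simp

-- ===== VERDICT (by name: the statement is the Claim_ definition above) =====
theorem upsert_section_py_spec : Claim_equal_upsert_section_py := by
  intro md header body _ hpre
  simp only [Spec_upsert_section_py, upsert_section_py, upsert_section_py_alt]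
  cases hf : aFindStart (PySem.Str.strip header) (PySem.Str.splitlines md) with
  | none =>
    rw [bfold0_none _ _ _ hf]
    simp
  | some s =>
    rcases bfold0_some (PySem.Str.strip header) (PySem.Str.splitlines (PySem.Str.strip body))
      (PySem.Str.splitlines md) s hf [] with ⟨st', hne, heq⟩
    rw [heq]
    simp only [List.nil_append]
    set LS := PySem.Str.splitlines md with hLS
    set BL := PySem.Str.splitlines (PySem.Str.strip body) with hBL
    have hend : List.drop (match aFirstHH (List.drop (s+1) LS) with
        | none => LS.length | some k => s+1+k) LS = dropU (List.drop (s+1) LS) := by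
      cases hfh : aFirstHH (List.drop (s+1) LS) with
      | none =>
        have h1 := firstHH_dropU (List.drop (s+1) LS)
        rw [hfh] at h1
        simp [← h1, List.drop_length]
      | some k =>
        have h1 := firstHH_dropU (List.drop (s+1) LS)
        rw [hfh] at h1
        rw [← h1]
        show List.drop (s+1+k) LS = List.drop k (List.drop (s+1) LS)
        rw [List.drop_drop]
    rw [hend]
    have hnl : List.take s LS ++ BL ++ dropU (List.drop (s+1) LS) ≠ [] := by
      cases s with
      | zero =>
        rcases findStart_zero _ _ hf with ⟨x, xs, hls, hx⟩
        by_cases hb : PySem.Str.strip body = ""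
        · unfold Pre_upsert_section_py crashB at hpre
          rw [← hLS, hls] at hpre
          simp [hb, hx] at hpre
          rcases hpre with ⟨y, hy, hsy⟩
          have : dropU (List.drop 1 LS) ≠ [] := by
            rw [hls]
            simpa using dropU_ne_nil xs y hy (by simpa using hsy)
          simp [List.append_eq_nil_iff]
          intro _ h2
          exact this (by simpa using h2)
        · have : BL ≠ [] := splitlines_ne_nil _ hb
          simp [List.append_eq_nil_iff]
          intro h1 _
          exact this h1
      | succ s' =>
        have hlt := findStart_lt _ _ _ hf
        intro h0
        have hl0 := congrArg List.length h0
        simp only [List.length_append, List.length_take, List.length_nil] at hl0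
        omega
    rw [pyGet_neg_one]
    cases hlast : (List.take s LS ++ BL ++ dropU (List.drop (s+1) LS)).getLast? with
    | none => exact absurd (List.getLast?_eq_none_iff.mp hlast) hnl
    | some last =>
      have hmem := List.mem_of_getLast? hlast
      have hend2 : PySem.Str.endswith last "\n" = false := by
        rcases List.mem_append.mp hmem with h1 | h2
        · rcases List.mem_append.mp h1 with h3 | h4
          · exact splitlines_no_nl_end md last (List.take_subset _ _ h3)
          · exact splitlines_no_nl_end (PySem.Str.strip body) last h4
        · exact splitlines_no_nl_end md last
            (List.drop_subset _ _ (dropU_subset _ h2))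
      have hend2' : PySem.Chars.endswith last.toList ['\n'] = false := by
        have h3 := hend2
        rw [PySem.Str.endswith_eq] at h3
        simpa using h3
      simp [hend2', hne]

@[simp] theorem upsert_section_py_raises : Claim_raises_upsert_section_py := by
  unfold Claim_raises_upsert_section_py
  refine ⟨?_, by decide⟩
  intro md header body _ hr hp
  unfold Raises_upsert_section_py at hr
  unfold Pre_upsert_section_py at hp
  exact Bool.false_ne_true (hp.symm.trans hr)
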